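-- pv_equiv track=rewrite | github.com/dzhama-omarov/Performance_Lab | task1/task1.py | walking_func
-- ===== SOURCE A (Python) =====
-- def walking_func(n: int, m: int) -> int:
--     '''Выводит путь, по которому, двигаясь интервалом длины
-- m по заданному массиву, концом будет являться первый элемент.
-- Началом одного интервала является конец предыдущего.
-- Путь - массив из начальных элементов полученных интервалов.
--
--     <b>Пример</b>
--
-- n = 5, m = 4
--
-- Круговой массив: 12345
--
-- При длине обхода 4 получаем интервалы: 1234, 4512, 2345, 5123, 3451
--
-- Полученный путь: 14253'''
--
--     if n < 1 or m < 1: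
--         raise ValueError("Значение аргументов не может быть ниже 1")
--
--     num = 1
--     path = "1"
--     iteration = 1
--
--     while (num == 1 and (iteration % m) == 0) is False:
--         if (iteration % m) == 0:
--             path += (str(num))
--         else:
--             num = (num + 1) // (n + 1) + (num + 1) % (n + 1)
--         iteration += 1
--     return int(path)
-- ===== SOURCE B (Python) =====
-- from math import gcd
--
--
-- def walking_func(n: int, m: int) -> int:
--     if n < 1 or m < 1:
--         raise ValueError("Значение аргументов не может быть ниже 1")
--     d = (m - 1) % n
--     if d == 0:
--         return 1
--     k = n // gcd(n, d)
--     return int("".join(str((i * d) % n + 1) for i in range(k)))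
-- ===== Notes on version B (the rewrite author's own statement) =====
-- stated objective: faster
-- what changed: Replaces the one-step-at-a-time simulated walk (m-1 unit moves per appended element) by direct modular arithmetic: each path element is (i*(m-1)) mod n + 1 and the path length n/gcd(n, m-1) is computed in closed form.
import Mathlib
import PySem

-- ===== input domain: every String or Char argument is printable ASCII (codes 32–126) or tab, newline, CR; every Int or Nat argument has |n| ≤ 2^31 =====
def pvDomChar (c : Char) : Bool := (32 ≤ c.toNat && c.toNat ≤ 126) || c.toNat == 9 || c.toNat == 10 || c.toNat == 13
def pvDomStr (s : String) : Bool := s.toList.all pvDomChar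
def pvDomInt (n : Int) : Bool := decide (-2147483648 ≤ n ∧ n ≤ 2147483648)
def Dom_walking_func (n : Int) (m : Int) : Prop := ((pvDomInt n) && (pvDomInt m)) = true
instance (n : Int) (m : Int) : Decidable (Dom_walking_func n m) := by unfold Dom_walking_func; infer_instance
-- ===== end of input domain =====

-- B replaces A's one-step-at-a-time circular walk (m-1 unit moves per appended element)
-- by direct modular arithmetic: element i is (i*(m-1)) mod n + 1 and the path has
-- n/gcd(n, m-1) elements, computed in closed form.

-- ===== PORT A =====
-- A's while loop, step for step (state: num, path, iteration); the fuel argument only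
-- makes the recursion total — the loop is proved below to stop within n*m iterations.
def pvLoopA (n m : Int) : Nat → Int → List Char → Int → List Char
  | 0, _, path, _ => path
  | fuel+1, num, path, iteration =>
    if num = 1 ∧ PySem.Int.mod iteration m = 0 then path
    else if PySem.Int.mod iteration m = 0 then
      pvLoopA n m fuel num (path ++ PySem.Int.toChars num) (iteration + 1)
    else
      pvLoopA n m fuel (PySem.Int.floordiv (num+1) (n+1) + PySem.Int.mod (num+1) (n+1)) path (iteration + 1)

def walking_func (n : Int) (m : Int) : Int :=
  if n < 1 ∨ m < 1 then 0   -- Python raises ValueError here; excluded by Pre_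
  else (PySem.Int.ofChars? (pvLoopA n m (n.toNat * m.toNat) 1 ['1'] 1)).getD 0

-- ===== PORT B =====
def walking_func_alt (n : Int) (m : Int) : Int :=
  if n < 1 ∨ m < 1 then 0   -- Python raises ValueError here; excluded by Pre_
  else
    let d := PySem.Int.mod (m - 1) n
    if d = 0 then 1
    else
      let k := PySem.Int.floordiv n (Int.gcd n d)
      (PySem.Int.ofChars? (((PySem.List.pyRange 0 k 1).map
          (fun i => PySem.Int.toChars (PySem.Int.mod (i * d) n + 1))).flatten)).getD 0

-- ===== PRECONDITION & SPEC =====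
-- Pre_ excludes exactly the inputs on which A raises ValueError (n < 1 or m < 1)
def Pre_walking_func (n : Int) (m : Int) : Prop := 1 ≤ n ∧ 1 ≤ m
instance (n : Int) (m : Int) : Decidable (Pre_walking_func n m) := by unfold Pre_walking_func; infer_instance
def pvWitness_walking_func : Int × Int := (5, 4)

def Spec_walking_func (n : Int) (m : Int) (out : Int) : Prop := out = walking_func_alt n m
instance (n : Int) (m : Int) (out : Int) : Decidable (Spec_walking_func n m out) := by unfold Spec_walking_func; infer_instance

-- ===== CLAIM (what is proved, stated in full; the proofs are below) =====
def Claim_equal_walking_func : Prop := ∀ (n : Int) (m : Int), Dom_walking_func n m → Pre_walking_func n m → Spec_walking_func n m (walking_func n m)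

-- ===== LEMMAS AND PROOFS =====

lemma pv_step (n v : Int) (hn : 1 ≤ n) (h1 : 1 ≤ v) (h2 : v ≤ n) :
    PySem.Int.floordiv (v+1) (n+1) + PySem.Int.mod (v+1) (n+1) = v % n + 1 := by
  rw [PySem.Int.floordiv_eq_ediv_of_pos (by omega), PySem.Int.mod_eq_emod_of_pos (by omega)]
  rcases eq_or_lt_of_le h2 with h|h
  · subst h
    rw [Int.ediv_self (by omega)]; simp
  · have e1 : (v+1) / (n+1) = 0 := Int.ediv_eq_zero_of_lt (by omega) (by omega)
    have e2 : (v+1) % (n+1) = v+1 := Int.emod_eq_of_lt (by omega) (by omega)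
    have e3 : v % n = v := Int.emod_eq_of_lt (by omega) (by omega)
    omega

lemma pv_adv (n m : Int) (hn : 1 ≤ n) (hm : 1 ≤ m) (j : Int) (hj : 0 ≤ j) :
    ∀ (r fuel : Nat) (v : Int) (path : List Char), (r : Int) < m → 1 ≤ v → v ≤ n →
    pvLoopA n m (fuel + r + 1) v path (j*m + m - r) =
      (if (v - 1 + r) % n + 1 = 1 then path
       else pvLoopA n m fuel ((v - 1 + r) % n + 1)
              (path ++ PySem.Int.toChars ((v - 1 + r) % n + 1)) ((j+1)*m + 1)) := by
  intro r
  induction r with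
  | zero =>
    intro fuel v path hr h1 h2
    have hv : (v - 1 + ((0:Nat):Int)) % n + 1 = v := by
      have h0 : (v - 1 + ((0:Nat):Int)) = v - 1 := by push_cast; ring
      rw [h0, Int.emod_eq_of_lt (by omega) (by omega)]; omega
    have hit : j*m + m - ((0:Nat):Int) = (j+1)*m := by push_cast; ring
    rw [hv, hit]
    have hmod : PySem.Int.mod ((j+1)*m) m = 0 := by
      rw [PySem.Int.mod_eq_emod_of_pos (by omega)]; exact Int.mul_emod_left _ _
    show pvLoopA n m (fuel+0+1) v path ((j+1)*m) = _
    by_cases h : v = 1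
    · simp only [pvLoopA, hmod, h, and_true, if_pos]
    · simp only [pvLoopA]
      rw [if_neg (fun hc => h hc.1), if_pos hmod, if_neg h]
  | succ r ih =>
    intro fuel v path hr h1 h2
    have hrm : (r:Int) + 1 < m := by push_cast at hr; omega
    have hmodne : PySem.Int.mod (j*m + m - ((r:Nat)+1:Nat)) m ≠ 0 := by
      rw [PySem.Int.mod_eq_emod_of_pos (by omega)]
      have h2' : j*m + m - ((r:Nat)+1:Nat) = (m - ((r:Int)+1)) + m*j := by push_cast; ring
      rw [h2', Int.add_mul_emod_self_left, Int.emod_eq_of_lt (by omega) (by omega)]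
      omega
    show pvLoopA n m ((fuel + r + 1)+1) v path (j*m + m - ((r:Nat)+1:Nat)) = _
    have hfirst : pvLoopA n m ((fuel+r+1)+1) v path (j*m + m - ((r:Nat)+1:Nat))
        = pvLoopA n m (fuel+r+1) (PySem.Int.floordiv (v+1) (n+1) + PySem.Int.mod (v+1) (n+1)) path (j*m + m - ((r:Nat)+1:Nat) + 1) := by
      simp only [pvLoopA]
      rw [if_neg (fun hc => hmodne hc.2), if_neg hmodne]
    rw [hfirst]
    · have hstep := pv_step n v hn h1 h2
      rw [hstep]
      have hiter : j*m + m - ((r:Nat)+1:Nat) + 1 = j*m + m - (r:Int) := by push_cast; ring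
      rw [hiter]
      have hb1 : 1 ≤ v % n + 1 := by have := Int.emod_nonneg v (by omega : n ≠ 0); omega
      have hb2 : v % n + 1 ≤ n := by have := Int.emod_lt_of_pos v (by omega : 0 < n); omega
      have := ih fuel (v % n + 1) path (by omega) hb1 hb2
      rw [this]
      have hre : (v % n + 1 - 1 + (r:Int)) % n = (v - 1 + ((r:Nat)+1:Nat)) % n := by
        have hv2 : v % n + 1 - 1 + (r:Int) = (v - 1 + ((r:Int)+1)) + n * (-(v / n)) := by
          rw [Int.emod_def]; ring
        rw [hv2, Int.add_mul_emod_self_left]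
        push_cast
        ring_nf
      rw [hre]

def pvBlocks (n d : Int) : Nat → Int → List Char → List Char
  | 0, _, path => path
  | t+1, v, path =>
      let v' := (v - 1 + d) % n + 1
      if v' = 1 then path else pvBlocks n d t v' (path ++ PySem.Int.toChars v')

lemma pv_blocks_eq (n m : Int) (hn : 1 ≤ n) (hm : 1 ≤ m) :
    ∀ (t : Nat) (j v : Int) (path : List Char), 0 ≤ j → 1 ≤ v → v ≤ n →
    pvLoopA n m (t * m.toNat) v path (j*m + 1) = pvBlocks n ((m-1) % n) t v path := by
  intro t
  induction t with
  | zero => intro j v path hj h1 h2; simp [pvLoopA, pvBlocks]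
  | succ t ih =>
    intro j v path hj h1 h2
    have hmt : ((m.toNat - 1 : Nat) : Int) = m - 1 := by omega
    have hfuel : (t+1) * m.toNat = t * m.toNat + (m.toNat - 1) + 1 := by
      have h1' : 1 ≤ m.toNat := by omega
      rw [Nat.succ_mul]; omega
    have hit : j*m + 1 = j*m + m - ((m.toNat - 1 : Nat) : Int) := by rw [hmt]; ring
    rw [hfuel, hit,
      pv_adv n m hn hm j hj (m.toNat - 1) (t*m.toNat) v path (by rw [hmt]; omega) h1 h2,
      hmt]
    have hcong : (v - 1 + (m-1)) % n = (v - 1 + (m-1)%n) % n := by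
      conv_lhs => rw [show m-1 = (m-1)%n + n*((m-1)/n) by rw [Int.emod_def]; ring]
      rw [← add_assoc, Int.add_mul_emod_self_left]
    simp only [pvBlocks]
    rw [← hcong]
    by_cases hw : (v - 1 + (m-1)) % n + 1 = 1
    · rw [if_pos hw, if_pos hw]
    · rw [if_neg hw, if_neg hw]
      have hb1 : 1 ≤ (v - 1 + (m-1)) % n + 1 := by
        have := Int.emod_nonneg (v - 1 + (m-1)) (by omega : n ≠ 0); omega
      have hb2 : (v - 1 + (m-1)) % n + 1 ≤ n := by
        have := Int.emod_lt_of_pos (v - 1 + (m-1)) (by omega : 0 < n); omega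
      exact ih (j+1) _ _ (by omega) hb1 hb2

lemma pv_dvd_helper (g a b J : Nat) (hg : 0 < g) (hco : Nat.Coprime a b) :
    g * a ∣ J * (g * b) ↔ a ∣ J := by
  rw [show J * (g * b) = g * (J * b) by ring, Nat.mul_dvd_mul_iff_left hg]
  constructor
  · exact fun h => hco.dvd_of_dvd_mul_right h
  · exact fun h => h.mul_right b

lemma pv_dvd_iff (N D J : Nat) (hN : 0 < N) (hD : 0 < D) :
    N ∣ J * D ↔ (N / N.gcd D) ∣ J := by
  have hg : 0 < N.gcd D := Nat.gcd_pos_of_pos_left _ hN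
  have := pv_dvd_helper (N.gcd D) (N / N.gcd D) (D / N.gcd D) J hg
    (Nat.coprime_div_gcd_div_gcd hg)
  rwa [Nat.mul_div_cancel' (Nat.gcd_dvd_left N D),
       Nat.mul_div_cancel' (Nat.gcd_dvd_right N D)] at this

def pvSeg (n d : Int) (a len : Nat) : List Char :=
  ((List.range' a len).map (fun i : Nat => PySem.Int.toChars (((i : Nat) : Int) * d % n + 1))).flatten

lemma pv_dvd_iff_int (n d : Int) (hn : 1 ≤ n) (hd0 : 0 < d) (J : Nat) :
    n ∣ (J:Int) * d ↔ (n.toNat / n.toNat.gcd d.toNat) ∣ J := by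
  have h1 : (J:Int) * d = ((J * d.toNat : Nat) : Int) := by
    push_cast; rw [Int.toNat_of_nonneg (by omega)]
  rw [h1, show n = ((n.toNat : Nat) : Int) by rw [Int.toNat_of_nonneg (by omega)],
    Int.natCast_dvd_natCast]
  exact pv_dvd_iff _ _ _ (by omega) (by omega)

lemma pv_main (n d : Int) (hn : 1 ≤ n) (hd0 : 0 < d) (hdn : d < n) :
    ∀ (t j : Nat) (path : List Char), j < n.toNat / n.toNat.gcd d.toNat →
      n.toNat / n.toNat.gcd d.toNat - j ≤ t →
    pvBlocks n d t (((j : Int) * d) % n + 1) path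
      = path ++ pvSeg n d (j+1) (n.toNat / n.toNat.gcd d.toNat - 1 - j) := by
  intro t
  induction t with
  | zero => intro j path hj ht; omega
  | succ t ih =>
    intro j path hj ht
    simp only [pvBlocks]
    have hv' : (((j:Int)*d) % n + 1 - 1 + d) % n = ((((j+1:Nat)):Int)*d) % n := by
      have h0 : ((j:Int)*d) % n + 1 - 1 + d = ((j:Int)*d + d) + n * (-(((j:Int)*d)/n)) := by
        rw [Int.emod_def]; ring
      rw [h0, Int.add_mul_emod_self_left]
      push_cast; ring_nf
    rw [hv']
    have hnn : 0 ≤ ((((j+1:Nat)):Int)*d) % n := Int.emod_nonneg _ (by omega)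
    by_cases hk : j + 1 = n.toNat / n.toNat.gcd d.toNat
    · have hdvd : n ∣ (((j+1:Nat)):Int)*d :=
        (pv_dvd_iff_int n d hn hd0 (j+1)).mpr (hk ▸ dvd_refl _)
      have hz : ((((j+1:Nat)):Int)*d) % n = 0 := Int.emod_eq_zero_of_dvd hdvd
      rw [if_pos (by omega)]
      have h00 : n.toNat / n.toNat.gcd d.toNat - 1 - j = 0 := by omega
      simp [pvSeg, h00]
    · have hndvd : ¬ n ∣ (((j+1:Nat)):Int)*d := by
        rw [pv_dvd_iff_int n d hn hd0 (j+1)]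
        intro hc
        have := Nat.le_of_dvd (by omega) hc
        omega
      have hne : ((((j+1:Nat)):Int)*d) % n ≠ 0 := fun hc => hndvd (Int.dvd_of_emod_eq_zero hc)
      rw [if_neg (by omega)]
      rw [ih (j+1) (path ++ PySem.Int.toChars (((((j+1:Nat)):Int)*d) % n + 1)) (by omega) (by omega)]
      have hlen : n.toNat / n.toNat.gcd d.toNat - 1 - j
          = (n.toNat / n.toNat.gcd d.toNat - 1 - (j+1)) + 1 := by omega
      rw [hlen]
      simp [pvSeg, List.range'_succ, List.append_assoc]

lemma pv_equiv (n m : Int) (hn : 1 ≤ n) (hm : 1 ≤ m) :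
    walking_func n m = walking_func_alt n m := by
  have hcond : ¬(n < 1 ∨ m < 1) := by omega
  have hd : PySem.Int.mod (m-1) n = (m-1) % n := PySem.Int.mod_eq_emod_of_pos (by omega)
  have hA : pvLoopA n m (n.toNat * m.toNat) 1 ['1'] 1 = pvBlocks n ((m-1)%n) n.toNat 1 ['1'] := by
    have := pv_blocks_eq n m hn hm n.toNat 0 1 ['1'] le_rfl le_rfl hn
    simpa using this
  simp only [walking_func, walking_func_alt, hcond, if_false, hd, hA]
  by_cases hdz : (m-1) % n = 0
  · rw [if_pos hdz, hdz]
    obtain ⟨t', ht'⟩ : ∃ t', n.toNat = t' + 1 := ⟨n.toNat - 1, by omega⟩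
    rw [ht']
    simp [pvBlocks]
    decide
  · rw [if_neg hdz]
    have hd0 : 0 < (m-1) % n := by
      have := Int.emod_nonneg (m-1) (by omega : n ≠ 0); omega
    have hdn : (m-1) % n < n := Int.emod_lt_of_pos _ (by omega)
    have hg : Int.gcd n ((m-1)%n) = n.toNat.gcd ((m-1)%n).toNat := by
      unfold Int.gcd; congr 1 <;> omega
    have hgpos : 0 < n.toNat.gcd ((m-1)%n).toNat := Nat.gcd_pos_of_pos_left _ (by omega)
    have hKpos : 0 < n.toNat / n.toNat.gcd ((m-1)%n).toNat :=
      Nat.div_pos (Nat.le_of_dvd (by omega) (Nat.gcd_dvd_left _ _)) hgpos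
    have hKle : n.toNat / n.toNat.gcd ((m-1)%n).toNat ≤ n.toNat := Nat.div_le_self _ _
    have hk : PySem.Int.floordiv n (Int.gcd n ((m-1)%n))
        = ((n.toNat / n.toNat.gcd ((m-1)%n).toNat : Nat) : Int) := by
      have h1 : PySem.Int.floordiv n ((Int.gcd n ((m-1)%n) : Nat) : Int)
          = PySem.Int.floordiv ((n.toNat : Nat) : Int) ((n.toNat.gcd ((m-1)%n).toNat : Nat) : Int) := by
        rw [hg, Int.toNat_of_nonneg (by omega : (0:Int) ≤ n)]
      rw [h1, PySem.Int.floordiv_natCast]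
    rw [hk, PySem.List.pyRange_zero_natCast]
    have hmain := pv_main n ((m-1)%n) hn hd0 hdn n.toNat 0 ['1'] hKpos (by omega)
    simp only [Nat.cast_zero, zero_mul, Int.zero_emod, zero_add] at hmain
    rw [hmain]
    obtain ⟨K', hK'⟩ : ∃ K', n.toNat / n.toNat.gcd ((m-1)%n).toNat = K' + 1 :=
      ⟨_, (Nat.succ_pred_eq_of_pos hKpos).symm⟩
    rw [hK']
    have hstr : (List.map (fun i => PySem.Int.toChars (PySem.Int.mod (i * ((m-1)%n)) n + 1))
          (List.map (fun k : Nat => (k:Int)) (List.range (K'+1)))).flatten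
        = ['1'] ++ pvSeg n ((m-1)%n) 1 (K'+1 - 1 - 0) := by
      rw [List.map_map, List.range_eq_range', List.range'_succ, List.map_cons, List.flatten_cons]
      congr 1
      · show PySem.Int.toChars (PySem.Int.mod (((0:Nat):Int) * ((m-1)%n)) n + 1) = ['1']
        rw [PySem.Int.mod_eq_emod_of_pos (by omega : (0:Int) < n)]
        norm_num
        decide
      · simp only [pvSeg, Nat.add_sub_cancel, Nat.sub_zero, Nat.zero_add,
          PySem.Int.mod_eq_emod_of_pos (by omega : (0:Int) < n)]
        rfl
    rw [hstr]

-- ===== VERDICT (by name: the statement is the Claim_ definition above) =====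
theorem walking_func_spec : Claim_equal_walking_func := by
  intro n m _ hpre
  exact pv_equiv n m hpre.1 hpre.2
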